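-- pv_equiv track=rewrite | github.com/lalalune/gptcoder | final_solves/solution_67385a82.py | solve
-- ===== SOURCE A (Python) =====
-- def solve(input_grid):
--     """
--     The function 'solve' transforms the input grid according to the rules observed from the examples provided.
--     In the rules, each cell in the grid with the number 3 that is adjacent (horizontally or vertically) to a
--     cell with the number 3, gets replaced with the number 8. A cell with the number 3 that does not have any
--     adjacent cell with the number 3, remains 3 in the output grid.
--
--     The function works by iterating over each cell in the input grid, checks the cell and its neighbors, and
--     builds the output grid accordingly.
--
--     Parameters:
--     input_grid: A 2D list, represents input grid where each element of grid is an integer.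
--
--     Returns:
--     output_grid: A transformed 2D list based on observed rules from examples.
--
--     """
--     # Initialize the output grid with the same size as the input grid
--     output_grid = [[0]*len(input_grid[0]) for _ in range(len(input_grid))]
--
--     for i in range(len(input_grid)):
--         for j in range(len(input_grid[0])):
--             # If the current cell is 3 and it has a neighbor which is also 3,
--             if input_grid[i][j] == 3 and (
--                 (i > 0 and input_grid[i-1][j] == 3) or  # check top neighbor
--                 (i < len(input_grid)-1 and input_grid[i+1][j] == 3) or  # check bottom neighbor
--                 (j > 0 and input_grid[i][j-1] == 3) or  # check left neighbor
--                 (j < len(input_grid[0])-1 and input_grid[i][j+1] == 3)  # check right neighbor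
--             ):
--                 output_grid[i][j] = 8
--             else:
--                 output_grid[i][j] = input_grid[i][j]
--
--     return output_grid
-- ===== SOURCE B (Python) =====
-- def solve(input_grid):
--     if not input_grid:
--         return []
--     n = len(input_grid)
--     w = len(input_grid[0])
--     adjacent3 = set()
--     # horizontal neighbor pairs
--     for i in range(n):
--         row = input_grid[i]
--         for j in range(w - 1):
--             if row[j] == 3 and row[j + 1] == 3:
--                 adjacent3.add((i, j))
--                 adjacent3.add((i, j + 1))
--     # vertical neighbor pairs
--     for j in range(w):
--         for i in range(n - 1):
--             if input_grid[i][j] == 3 and input_grid[i + 1][j] == 3: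
--                 adjacent3.add((i, j))
--                 adjacent3.add((i + 1, j))
--     return [[8 if (i, j) in adjacent3 else input_grid[i][j] for j in range(w)]
--             for i in range(n)]
-- ===== Notes on version B (the rewrite author's own statement) =====
-- stated objective: alternative
-- what changed: A makes each cell probe its four neighbors; B scans each adjacent cell pair once (horizontal pairs by rows, vertical pairs by columns), marks both endpoints of every 3-3 pair in a set, then writes 8 at marked cells and copies the rest.
import Mathlib
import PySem

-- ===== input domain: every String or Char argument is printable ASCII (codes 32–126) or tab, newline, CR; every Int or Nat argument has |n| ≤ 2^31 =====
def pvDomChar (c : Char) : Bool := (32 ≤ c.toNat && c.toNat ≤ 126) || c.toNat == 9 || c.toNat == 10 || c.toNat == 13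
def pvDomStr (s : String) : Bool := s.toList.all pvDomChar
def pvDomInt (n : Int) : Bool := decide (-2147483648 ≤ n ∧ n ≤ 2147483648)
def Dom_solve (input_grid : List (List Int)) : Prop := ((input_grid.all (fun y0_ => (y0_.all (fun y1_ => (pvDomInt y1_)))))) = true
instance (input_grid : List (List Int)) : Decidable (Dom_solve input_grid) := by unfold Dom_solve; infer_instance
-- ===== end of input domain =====

-- B marks both endpoints of every adjacent 3-3 pair in a set in one edge scan, instead of A's per-cell probe of its four neighbors; same cost, different decomposition.

-- ===== PORT A =====
-- input_grid[i][j] (indices are nonnegative loop counters; the default is never hit inside Pre_)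
def gridAt (grid : List (List Int)) (i j : Int) : Int :=
  (PySem.List.pyGet? ((PySem.List.pyGet? grid i).getD []) j).getD 0

def solve (input_grid : List (List Int)) : List (List Int) :=
  let n : Int := input_grid.length
  let w : Int := ((PySem.List.pyGet? input_grid 0).getD []).length
  (PySem.List.pyRange 0 n 1).map (fun i =>
    (PySem.List.pyRange 0 w 1).map (fun j =>
      if gridAt input_grid i j = 3 ∧
          ((i > 0 ∧ gridAt input_grid (i-1) j = 3) ∨
           (i < n - 1 ∧ gridAt input_grid (i+1) j = 3) ∨
           (j > 0 ∧ gridAt input_grid i (j-1) = 3) ∨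
           (j < w - 1 ∧ gridAt input_grid i (j+1) = 3))
      then 8 else gridAt input_grid i j))

-- ===== PORT B =====
def solve_alt (input_grid : List (List Int)) : List (List Int) :=
  if input_grid = [] then []
  else
    let n : Int := input_grid.length
    let w : Int := ((PySem.List.pyGet? input_grid 0).getD []).length
    let s1 : PySem.Set (Int × Int) :=
      (PySem.List.pyRange 0 n 1).foldl (fun s i =>
        let row := (PySem.List.pyGet? input_grid i).getD []
        (PySem.List.pyRange 0 (w-1) 1).foldl (fun s j =>
          if (PySem.List.pyGet? row j).getD 0 = 3 ∧ (PySem.List.pyGet? row (j+1)).getD 0 = 3 then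
            PySem.Set.add (PySem.Set.add s (i, j)) (i, j+1)
          else s) s) PySem.Set.empty
    let s2 : PySem.Set (Int × Int) :=
      (PySem.List.pyRange 0 w 1).foldl (fun s j =>
        (PySem.List.pyRange 0 (n-1) 1).foldl (fun s i =>
          if gridAt input_grid i j = 3 ∧ gridAt input_grid (i+1) j = 3 then
            PySem.Set.add (PySem.Set.add s (i, j)) (i+1, j)
          else s) s) s1
    (PySem.List.pyRange 0 n 1).map (fun i =>
      (PySem.List.pyRange 0 w 1).map (fun j =>
        if (i, j) ∈ s2 then 8 else gridAt input_grid i j))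

-- ===== PRECONDITION & SPEC =====
-- Pre_ excludes exactly the grids on which A raises IndexError: a nonempty grid with some row shorter than the first row.
def Pre_solve (input_grid : List (List Int)) : Prop :=
  input_grid = [] ∨ ∀ row ∈ input_grid, (input_grid.headD []).length ≤ row.length
instance (input_grid : List (List Int)) : Decidable (Pre_solve input_grid) := by unfold Pre_solve; infer_instance
def pvWitness_solve : List (List Int) := [[3, 3], [0, 3]]

def Spec_solve (input_grid : List (List Int)) (out : List (List Int)) : Prop := out = solve_alt input_grid
instance (input_grid : List (List Int)) (out : List (List Int)) : Decidable (Spec_solve input_grid out) := by unfold Spec_solve; infer_instance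

-- ===== CLAIM (what is proved, stated in full; the proofs are below) =====
def Claim_equal_solve : Prop := ∀ (input_grid : List (List Int)), Dom_solve input_grid → Pre_solve input_grid → Spec_solve input_grid (solve input_grid)

-- ===== LEMMAS AND PROOFS =====

-- membership in a fold that conditionally adds two elements per step
lemma mem_foldl_addTwo {α β : Type} [BEq β] [LawfulBEq β] (P : α → Prop) [DecidablePred P]
    (a b : α → β) (l : List α) (s : PySem.Set β) (p : β) :
    (p ∈ l.foldl (fun s x => if P x then PySem.Set.add (PySem.Set.add s (a x)) (b x) else s) s) ↔
      p ∈ s ∨ ∃ x ∈ l, P x ∧ (p = a x ∨ p = b x) := by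
  induction l generalizing s with
  | nil => simp
  | cons y t ih =>
    by_cases h : P y
    · simp [List.foldl_cons, h, ih, PySem.Set.mem_add, or_assoc]
    · simp [List.foldl_cons, h, ih]

-- membership through an outer fold whose step has a membership characterisation
lemma mem_foldl_of_step {α β : Type} (F : PySem.Set β → α → PySem.Set β) (Q : α → β → Prop)
    (h : ∀ s x p, p ∈ F s x ↔ p ∈ s ∨ Q x p) (l : List α) (s : PySem.Set β) (p : β) :
    p ∈ l.foldl F s ↔ p ∈ s ∨ ∃ x ∈ l, Q x p := by
  induction l generalizing s with
  | nil => simp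
  | cons y t ih =>
    simp only [List.foldl_cons, ih, h, List.mem_cons, exists_eq_or_imp, or_assoc]

-- ===== VERDICT (by name: the statement is the Claim_ definition above) =====
theorem solve_spec : Claim_equal_solve := by
  intro grid _ _
  unfold Spec_solve solve solve_alt
  by_cases hnil : grid = []
  · subst hnil; simp [PySem.List.pyRange_one_eq_nil]
  · simp only [if_neg hnil]
    set n : Int := (grid.length : Int) with hn
    set w : Int := (((PySem.List.pyGet? grid 0).getD []).length : Int) with hw
    have hrow : ∀ (i j : Int),
        (PySem.List.pyGet? ((PySem.List.pyGet? grid i).getD []) j).getD 0 = gridAt grid i j := by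
      intro i j; rfl
    -- characterise membership in the horizontal marking set s1
    have hs1 : ∀ p : Int × Int,
        p ∈ ((PySem.List.pyRange 0 n 1).foldl (fun s i =>
          (PySem.List.pyRange 0 (w-1) 1).foldl (fun s j =>
            if (PySem.List.pyGet? ((PySem.List.pyGet? grid i).getD []) j).getD 0 = 3 ∧
                (PySem.List.pyGet? ((PySem.List.pyGet? grid i).getD []) (j+1)).getD 0 = 3 then
              PySem.Set.add (PySem.Set.add s (i, j)) (i, j+1)
            else s) s) PySem.Set.empty) ↔
        ∃ i, (0 ≤ i ∧ i < n) ∧ ∃ j, (0 ≤ j ∧ j < w - 1) ∧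
          (gridAt grid i j = 3 ∧ gridAt grid i (j+1) = 3) ∧ (p = (i, j) ∨ p = (i, j+1)) := by
      intro p
      rw [mem_foldl_of_step
        (Q := fun i p => ∃ j ∈ PySem.List.pyRange 0 (w-1) 1,
          (gridAt grid i j = 3 ∧ gridAt grid i (j+1) = 3) ∧ (p = (i, j) ∨ p = (i, j+1)))
        (h := by
          intro s i q
          simpa [hrow] using mem_foldl_addTwo
            (P := fun j => gridAt grid i j = 3 ∧ gridAt grid i (j+1) = 3)
            (a := fun j => (i, j)) (b := fun j => (i, j+1))
            (PySem.List.pyRange 0 (w-1) 1) s q)]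
      simp [PySem.Set.empty, PySem.List.mem_pyRange_one]
    -- characterise membership in the full marking set s2
    have hs2 : ∀ p : Int × Int,
        p ∈ ((PySem.List.pyRange 0 w 1).foldl (fun s j =>
          (PySem.List.pyRange 0 (n-1) 1).foldl (fun s i =>
            if gridAt grid i j = 3 ∧ gridAt grid (i+1) j = 3 then
              PySem.Set.add (PySem.Set.add s (i, j)) (i+1, j)
            else s) s)
          ((PySem.List.pyRange 0 n 1).foldl (fun s i =>
            (PySem.List.pyRange 0 (w-1) 1).foldl (fun s j =>
              if (PySem.List.pyGet? ((PySem.List.pyGet? grid i).getD []) j).getD 0 = 3 ∧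
                  (PySem.List.pyGet? ((PySem.List.pyGet? grid i).getD []) (j+1)).getD 0 = 3 then
                PySem.Set.add (PySem.Set.add s (i, j)) (i, j+1)
              else s) s) PySem.Set.empty)) ↔
        ((∃ i, (0 ≤ i ∧ i < n) ∧ ∃ j, (0 ≤ j ∧ j < w - 1) ∧
            (gridAt grid i j = 3 ∧ gridAt grid i (j+1) = 3) ∧ (p = (i, j) ∨ p = (i, j+1))) ∨
         (∃ j, (0 ≤ j ∧ j < w) ∧ ∃ i, (0 ≤ i ∧ i < n - 1) ∧
            (gridAt grid i j = 3 ∧ gridAt grid (i+1) j = 3) ∧ (p = (i, j) ∨ p = (i+1, j)))) := by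
      intro p
      rw [mem_foldl_of_step
        (Q := fun j p => ∃ i ∈ PySem.List.pyRange 0 (n-1) 1,
          (gridAt grid i j = 3 ∧ gridAt grid (i+1) j = 3) ∧ (p = (i, j) ∨ p = (i+1, j)))
        (h := by
          intro s j q
          simpa using mem_foldl_addTwo
            (P := fun i => gridAt grid i j = 3 ∧ gridAt grid (i+1) j = 3)
            (a := fun i => (i, j)) (b := fun i => (i+1, j))
            (PySem.List.pyRange 0 (n-1) 1) s q)]
      rw [hs1]
      simp [PySem.List.mem_pyRange_one]
    -- cellwise equality
    refine List.map_congr_left ?_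
    intro i hi
    rw [PySem.List.mem_pyRange_one] at hi
    refine List.map_congr_left ?_
    intro j hj
    rw [PySem.List.mem_pyRange_one] at hj
    refine if_congr ?_ rfl rfl
    rw [hs2 (i, j)]
    constructor
    · rintro ⟨h3, ⟨hgt, htop⟩ | ⟨hlt, hbot⟩ | ⟨hgt, hleft⟩ | ⟨hlt, hright⟩⟩
      · exact Or.inr ⟨j, ⟨hj.1, hj.2⟩, i - 1, ⟨by omega, by omega⟩,
          ⟨htop, by simpa using h3⟩, Or.inr (by simp)⟩
      · exact Or.inr ⟨j, ⟨hj.1, hj.2⟩, i, ⟨hi.1, hlt⟩, ⟨h3, hbot⟩, Or.inl rfl⟩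
      · exact Or.inl ⟨i, ⟨hi.1, hi.2⟩, j - 1, ⟨by omega, by omega⟩,
          ⟨hleft, by simpa using h3⟩, Or.inr (by simp)⟩
      · exact Or.inl ⟨i, ⟨hi.1, hi.2⟩, j, ⟨hj.1, hlt⟩, ⟨h3, hright⟩, Or.inl rfl⟩
    · rintro (⟨i', hi', j', hj', ⟨h1, h2⟩, hp | hp⟩ |
              ⟨j', hj', i', hi', ⟨h1, h2⟩, hp | hp⟩) <;>
        (injection hp with e1 e2; subst e1; subst e2)
      · exact ⟨h1, Or.inr (Or.inr (Or.inr ⟨by omega, h2⟩))⟩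
      · exact ⟨h2, Or.inr (Or.inr (Or.inl ⟨by omega, by simpa using h1⟩))⟩
      · exact ⟨h1, Or.inr (Or.inl ⟨by omega, h2⟩)⟩
      · exact ⟨h2, Or.inl ⟨by omega, by simpa using h1⟩⟩
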